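-- pv_equiv track=rewrite | github.com/darraes/coding_questions | v2/_leet_code_/0053_max_sub_array.py | _max_to_the_left
-- ===== SOURCE A (Python) =====
-- def _max_to_the_left(nums, mid, left):
--     i = mid - 1
--     max_sum = current_sum = 0
--
--     while i >= left:
--         current_sum += nums[i]
--         max_sum = max(max_sum, current_sum)
--         i -= 1
--
--     return max_sum
-- ===== SOURCE B (Python) =====
-- def _max_to_the_left(nums, mid, left):
--     # Identity: the maximum suffix sum of nums[left:mid] (including the empty
--     # suffix, i.e. floored at 0) equals total - (minimum forward prefix sum).
--     total = 0
--     lowest = 0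
--     for x in nums[left:mid]:
--         total += x
--         if total < lowest:
--             lowest = total
--     return total - lowest
-- ===== Notes on version B (the rewrite author's own statement) =====
-- stated objective: alternative
-- what changed: Replaces A's backward running-max suffix scan by a forward pass tracking the minimum prefix sum and returning total - min_prefix, using the identity max-suffix-sum = total - min-prefix-sum (the 0 floor comes from the empty prefix/suffix).
-- outside the precondition, e.g. on _max_to_the_left([1, 2], 0, -1): A returns 2, B returns 0; on _max_to_the_left([1], 5, 0): A raises IndexError, B returns 1
import Mathlib
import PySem

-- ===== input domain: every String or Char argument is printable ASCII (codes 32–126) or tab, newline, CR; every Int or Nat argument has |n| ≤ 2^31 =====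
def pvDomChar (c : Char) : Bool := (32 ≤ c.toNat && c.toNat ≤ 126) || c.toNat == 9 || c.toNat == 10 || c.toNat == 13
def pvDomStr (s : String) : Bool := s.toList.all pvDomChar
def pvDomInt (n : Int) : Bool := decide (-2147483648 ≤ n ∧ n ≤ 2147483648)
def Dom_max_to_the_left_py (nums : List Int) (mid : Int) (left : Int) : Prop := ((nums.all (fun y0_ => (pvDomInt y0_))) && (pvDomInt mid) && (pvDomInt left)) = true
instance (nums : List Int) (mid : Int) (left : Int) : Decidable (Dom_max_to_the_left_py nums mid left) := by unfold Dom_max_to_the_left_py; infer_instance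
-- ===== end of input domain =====

-- B replaces A's backward running-max suffix scan by a forward pass tracking the
-- minimum prefix sum, returning total - min_prefix (alternative algorithm, same cost).


-- ===== PORT A =====
-- A's while loop: i from mid-1 down to left, current_sum += nums[i], max_sum = max(max_sum, current_sum).
-- fuel = number of remaining iterations (= i - left + 1 at entry).
def pvALoop (nums : List Int) (left : Int) : Nat → Int → Int → Int → Int
  | 0, _, _, maxSum => maxSum
  | fuel + 1, i, currentSum, maxSum =>
    if i ≥ left then
      let currentSum' := currentSum + (PySem.List.pyGet? nums i).getD 0
      let maxSum' := max maxSum currentSum'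
      pvALoop nums left fuel (i - 1) currentSum' maxSum'
    else maxSum

def max_to_the_left_py (nums : List Int) (mid : Int) (left : Int) : Int :=
  pvALoop nums left (mid - left).toNat (mid - 1) 0 0

-- ===== PORT B =====
-- Source B's forward for-loop over nums[left:mid], state (total, lowest)
def pvBLoop : List Int → Int → Int → Int × Int
  | [], total, lowest => (total, lowest)
  | x :: xs, total, lowest =>
    let total' := total + x
    pvBLoop xs total' (if total' < lowest then total' else lowest)

def max_to_the_left_py_alt (nums : List Int) (mid : Int) (left : Int) : Int :=
  let (total, lowest) := pvBLoop (PySem.List.slice nums (some left) (some mid)) 0 0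
  total - lowest

-- ===== PRECONDITION & SPEC =====
-- Pre_ excludes mid/left combinations where A's backward loop either raises IndexError or
-- reads elements outside the window through Python's negative-index wraparound (an accident of
-- indexing); it keeps in-range windows with both bounds nonnegative or both negative, and all
-- combinations where the loop never runs (mid <= left).
def Pre_max_to_the_left_py (nums : List Int) (mid : Int) (left : Int) : Prop :=
  (0 ≤ left ∧ 0 ≤ mid ∧ mid ≤ nums.length) ∨
  (-(nums.length : Int) ≤ left ∧ left ≤ mid ∧ mid < 0) ∨
  (mid ≤ left ∧ (0 ≤ mid ∨ left < 0 ∨ (nums.length : Int) + mid ≤ left))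
instance (nums : List Int) (mid : Int) (left : Int) : Decidable (Pre_max_to_the_left_py nums mid left) := by unfold Pre_max_to_the_left_py; infer_instance

def pvWitness_max_to_the_left_py : List Int × Int × Int := ([3, -1, 4, -2], 3, 1)

def Spec_max_to_the_left_py (nums : List Int) (mid : Int) (left : Int) (out : Int) : Prop := out = max_to_the_left_py_alt nums mid left
instance (nums : List Int) (mid : Int) (left : Int) (out : Int) : Decidable (Spec_max_to_the_left_py nums mid left out) := by unfold Spec_max_to_the_left_py; infer_instance

-- ===== CLAIM (what is proved, stated in full; the proofs are below) =====
def Claim_equal_max_to_the_left_py : Prop := ∀ (nums : List Int) (mid : Int) (left : Int), Dom_max_to_the_left_py nums mid left → Pre_max_to_the_left_py nums mid left → Spec_max_to_the_left_py nums mid left (max_to_the_left_py nums mid left)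

-- ===== LEMMAS AND PROOFS =====

-- the slice nums[left:mid] is empty whenever its clamped bounds cross
lemma pvSliceNil (nums : List Int) (mid left : Int)
    (hml : mid ≤ left)
    (h : 0 ≤ mid ∨ left < 0 ∨ (nums.length : Int) + mid ≤ left) :
    PySem.List.slice nums (some left) (some mid) = [] := by
  apply List.eq_nil_of_length_eq_zero
  rw [PySem.List.length_slice]
  unfold PySem.List.clampIdx
  split_ifs <;> omega

-- reference function for A's loop: consume the reversed window, tracking (cur, mx)
def pvG : List Int → Int → Int → Int
  | [], _, mx => mx
  | x :: xs, cur, mx => pvG xs (cur + x) (max mx (cur + x))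

lemma aLoop_eq (w : List Int) : ∀ (pre post : List Int) (cur mx : Int),
    pvALoop (pre ++ w ++ post) (pre.length : Int) w.length
      ((pre.length : Int) + (w.length : Int) - 1) cur mx = pvG w.reverse cur mx := by
  induction w using List.reverseRecOn with
  | nil => intro pre post cur mx; simp [pvALoop, pvG]
  | append_singleton w' a ih =>
    intro pre post cur mx
    have hlen : (w' ++ [a]).length = w'.length + 1 := by simp
    rw [hlen]
    have hidx : (pre.length : Int) + ((w'.length + 1 : Nat) : Int) - 1
        = ((pre.length + w'.length : Nat) : Int) := by push_cast; ring
    have hget : PySem.List.pyGet? (pre ++ (w' ++ [a]) ++ post)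
        ((pre.length + w'.length : Nat) : Int) = some a := by
      rw [PySem.List.pyGet?_natCast]
      have : pre ++ (w' ++ [a]) ++ post = (pre ++ w') ++ a :: post := by simp
      rw [this]
      have h2 : (pre ++ w').length = pre.length + w'.length := by simp
      rw [← h2]
      simp
    rw [pvALoop]
    rw [hidx, hget]
    have hge : ((pre.length + w'.length : Nat) : Int) ≥ (pre.length : Int) := by
      push_cast; omega
    simp only [hge, if_pos, Option.getD_some]
    have hre : pre ++ (w' ++ [a]) ++ post = pre ++ w' ++ ([a] ++ post) := by simp
    have hidx2 : ((pre.length + w'.length : Nat) : Int) - 1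
        = (pre.length : Int) + (w'.length : Int) - 1 := by push_cast; ring
    rw [hre, hidx2, ih pre ([a] ++ post)]
    simp [pvG]

-- A's loop over negative in-range indices reads the same cells as after shifting by len
lemma pvALoop_shift (nums : List Int) (left : Int) (hln : -(nums.length : Int) ≤ left) :
    ∀ (fuel : Nat) (i cur mx : Int), i < 0 →
      pvALoop nums left fuel i cur mx
        = pvALoop nums (left + nums.length) fuel (i + nums.length) cur mx := by
  intro fuel
  induction fuel with
  | zero => intro i cur mx _; rfl
  | succ f ih =>
    intro i cur mx hi
    rw [pvALoop, pvALoop]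
    by_cases hge : i ≥ left
    · have hge' : i + (nums.length : Int) ≥ left + nums.length := by omega
      rw [if_pos hge, if_pos hge']
      have hget : PySem.List.pyGet? nums i = PySem.List.pyGet? nums (i + nums.length) := by
        have hk : i = -(((-i).toNat : Nat) : Int) := by omega
        have h0 : 0 < (-i).toNat := by omega
        have h1 : (-i).toNat ≤ nums.length := by omega
        rw [hk, PySem.List.pyGet?_neg_natCast nums (-i).toNat h0 h1]
        have h2 : -(((-i).toNat : Nat) : Int) + nums.length
            = ((nums.length - (-i).toNat : Nat) : Int) := by push_cast; omega
        rw [h2, PySem.List.pyGet?_natCast]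
      rw [hget]
      have hi1 : i - 1 < 0 := by omega
      have : i + (nums.length : Int) - 1 = (i - 1) + nums.length := by ring
      rw [this]
      exact ih (i - 1) _ _ hi1
    · rw [if_neg hge, if_neg (by omega)]

-- a slice with in-range negative bounds equals the shifted nonnegative slice
lemma pvSliceShift (nums : List Int) (mid left : Int)
    (h1 : -(nums.length : Int) ≤ left) (h2 : left ≤ mid) (h3 : mid < 0) :
    PySem.List.slice nums (some left) (some mid)
      = PySem.List.slice nums (some (left + nums.length)) (some (mid + nums.length)) := by
  have ha : PySem.List.clampIdx nums.length left
      = PySem.List.clampIdx nums.length (left + nums.length) := by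
    unfold PySem.List.clampIdx; split_ifs <;> omega
  have hb : PySem.List.clampIdx nums.length mid
      = PySem.List.clampIdx nums.length (mid + nums.length) := by
    unfold PySem.List.clampIdx; split_ifs <;> omega
  simp only [PySem.List.slice, ha, hb]

-- the A-side main equation on a window with nonnegative in-range bounds
lemma pvMainNonneg (nums : List Int) (mid left : Int)
    (hl : 0 ≤ left) (hm : 0 ≤ mid) (hmn : mid ≤ nums.length) :
    pvALoop nums left (mid - left).toNat (mid - 1) 0 0
      = pvG (PySem.List.slice nums (some left) (some mid)).reverse 0 0 := by
  by_cases hlm : mid ≤ left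
  · have hf : (mid - left).toNat = 0 := by omega
    rw [hf]
    have hs : PySem.List.slice nums (some left) (some mid) = [] := by
      rw [PySem.List.slice_toNat nums hl hm]
      have : mid.toNat - left.toNat = 0 := by omega
      simp [this]
    rw [hs]
    rfl
  · push Not at hlm
    set pre := nums.take left.toNat with hpredef
    set w := (nums.drop left.toNat).take (mid.toNat - left.toNat) with hwdef
    set post := nums.drop mid.toNat with hpostdef
    have hprelen : pre.length = left.toNat := by
      simp [hpredef]; omega
    have hwlen : w.length = mid.toNat - left.toNat := by
      simp [hwdef]; omega
    have hdecomp : nums = pre ++ w ++ post := by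
      rw [List.append_assoc, hpredef, hwdef, hpostdef]
      have h1 : List.drop mid.toNat nums
          = List.drop (mid.toNat - left.toNat) (List.drop left.toNat nums) := by
        rw [List.drop_drop]; congr 1; omega
      rw [h1, List.take_append_drop, List.take_append_drop]
    have hslice : PySem.List.slice nums (some left) (some mid) = w := by
      rw [PySem.List.slice_toNat nums hl hm, hwdef]
    rw [hslice]
    have hleft : left = (pre.length : Int) := by rw [hprelen]; omega
    have hfuel : (mid - left).toNat = w.length := by rw [hwlen]; omega
    have hmid1 : mid - 1 = (pre.length : Int) + (w.length : Int) - 1 := by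
      rw [hprelen, hwlen]; omega
    rw [hfuel, hmid1, hleft]
    conv_lhs => rw [hdecomp]
    exact aLoop_eq w pre post 0 0

-- minimum prefix sum of a list, including the empty prefix
def pvMnp : List Int → Int
  | [] => 0
  | x :: xs => min 0 (x + pvMnp xs)

lemma pvMnp_nonpos (w : List Int) : pvMnp w ≤ 0 := by
  cases w with
  | nil => simp [pvMnp]
  | cons x xs => simp [pvMnp]

-- B's loop computes (total + sum, min lowest (total + min prefix)) given lowest ≤ total
lemma pvBLoop_eq (w : List Int) : ∀ (t m : Int), m ≤ t →
    pvBLoop w t m = (t + w.sum, min m (t + pvMnp w)) := by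
  induction w with
  | nil => intro t m hmt; simp [pvBLoop, pvMnp]; omega
  | cons x xs ih =>
    intro t m hmt
    show pvBLoop xs (t + x) (if t + x < m then t + x else m) = _
    have hm' : (if t + x < m then t + x else m) ≤ t + x := by split_ifs <;> omega
    rw [ih (t + x) _ hm']
    have hx := pvMnp_nonpos xs
    simp only [Prod.mk.injEq, List.sum_cons, pvMnp]
    constructor
    · omega
    · split_ifs <;> omega

-- A's reference over the reversed window equals total - min prefix of the window
lemma pvG_append (l : List Int) : ∀ (x c m : Int),
    pvG (l ++ [x]) c m = max (pvG l c m) (c + l.sum + x) := by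
  induction l with
  | nil => intro x c m; simp [pvG]
  | cons y ys ih =>
    intro x c m
    simp only [List.cons_append, pvG, List.sum_cons, ih]
    congr 1
    ring

lemma pvG_rev (w : List Int) : pvG w.reverse 0 0 = w.sum - pvMnp w := by
  induction w with
  | nil => simp [pvG, pvMnp]
  | cons x xs ih =>
    rw [List.reverse_cons, pvG_append, ih]
    simp only [pvMnp, List.sum_cons, List.sum_reverse]
    omega

-- ===== VERDICT (by name: the statement is the Claim_ definition above) =====
theorem max_to_the_left_py_spec : Claim_equal_max_to_the_left_py := by
  intro nums mid left _ hpre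
  unfold Spec_max_to_the_left_py max_to_the_left_py max_to_the_left_py_alt
  rw [pvBLoop_eq _ 0 0 le_rfl]
  simp only [zero_add]
  have hmp := pvMnp_nonpos (PySem.List.slice nums (some left) (some mid))
  have halt : (PySem.List.slice nums (some left) (some mid)).sum
      - min 0 (pvMnp (PySem.List.slice nums (some left) (some mid)))
      = pvG (PySem.List.slice nums (some left) (some mid)).reverse 0 0 := by
    rw [pvG_rev]; omega
  rw [halt]
  rcases hpre with ⟨hl, hm, hmn⟩ | ⟨h1, h2, h3⟩ | ⟨hml, hrest⟩
  · exact pvMainNonneg nums mid left hl hm hmn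
  · have hmid1 : mid - 1 < 0 := by omega
    rw [pvALoop_shift nums left h1 _ _ _ _ hmid1]
    rw [pvSliceShift nums mid left h1 h2 h3]
    have hf : (mid - left).toNat = ((mid + nums.length) - (left + nums.length)).toNat := by
      congr 1; ring
    have hi : mid - 1 + (nums.length : Int) = (mid + nums.length) - 1 := by ring
    rw [hf, hi]
    exact pvMainNonneg nums (mid + nums.length) (left + nums.length)
      (by omega) (by omega) (by omega)
  · have hf : (mid - left).toNat = 0 := by omega
    rw [hf, pvSliceNil nums mid left hml hrest]
    rfl
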